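-- pv_equiv track=rewrite | github.com/Lalith3470/GeeksforGeeks | Geek hates too many 1s.py | noConseBits
-- ===== SOURCE A (Python) =====
-- def noConseBits(n : int) -> int:
--     # code here
--     n=bin(n)
--     c=0
--     s=[]
--     for i in range(2,len(n)):
--         if n[i]=="1":
--             c+=1
--         else:
--             if c>0:c=0
--         s.append(n[i])
--         if c==3:
--             s[-1]="0"
--             c=0
--     return int("".join(s),2)
-- ===== SOURCE B (Python) =====
-- def noConseBits(n: int) -> int:
--     # run-based: split the bit string on '0' into maximal runs of ones,
--     # replace each run by the '110' pattern truncated to its length, rejoin.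
--     bits = bin(n)[2:]
--     out = "0".join(("110" * len(run))[:len(run)] for run in bits.split("0"))
--     return int(out, 2)
-- ===== Notes on version B (the rewrite author's own statement) =====
-- stated objective: simpler
-- what changed: Replaces the char-by-char scan with a stateful counter and in-place patching by a run decomposition: split the bit string on '0' into maximal runs of ones, map each run to the '110' pattern truncated to its length, and rejoin with '0'.
import Mathlib
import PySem

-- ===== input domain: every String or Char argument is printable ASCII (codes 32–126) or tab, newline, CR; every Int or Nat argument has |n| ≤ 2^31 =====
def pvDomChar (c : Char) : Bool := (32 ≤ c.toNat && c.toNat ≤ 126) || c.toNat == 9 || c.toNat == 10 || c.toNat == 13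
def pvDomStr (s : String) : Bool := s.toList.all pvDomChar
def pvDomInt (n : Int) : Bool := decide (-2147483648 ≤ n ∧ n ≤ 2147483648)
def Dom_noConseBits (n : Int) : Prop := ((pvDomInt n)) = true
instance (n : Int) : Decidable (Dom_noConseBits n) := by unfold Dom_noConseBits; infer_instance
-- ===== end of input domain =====

-- B replaces A's char-by-char counter scan by a split-on-'0' run decomposition (simpler); Pre_ excludes n < 0, where A raises ValueError.


-- ===== PORT A =====
-- the body of A's `for i in range(2, len(n))` loop, acting on the state (c, s)
def stepA (cs : Int × List Char) (ch : Char) : Int × List Char :=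
  let c := cs.1
  let s := cs.2
  let c := if ch = '1' then c + 1 else (if c > 0 then 0 else c)
  let s := s ++ [ch]
  if c = 3 then (0, s.dropLast ++ ['0']) else (c, s)

-- literal transliteration of A: t = bin(n); counter c and list s over range(2, len(t));
-- append t[i], and when c hits 3 overwrite s[-1] with '0' and reset; int(''.join(s), 2)
def noConseBits (n : Int) : Int :=
  let t := PySem.Int.toBinChars0b n
  let st := (PySem.List.pyRange 2 (PySem.List.len t)).foldl
    (fun (cs : Int × List Char) i => stepA cs (PySem.List.pyGetD t i ' ')) ((0 : Int), ([] : List Char))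
  (PySem.Int.ofCharsBase? st.2 2).getD 0

-- ===== PORT B =====
-- bits = bin(n)[2:]; out = "0".join(("110"*len(run))[:len(run)] for run in bits.split("0")); int(out, 2)
def noConseBits_alt (n : Int) : Int :=
  let bits := PySem.List.slice (PySem.Int.toBinChars0b n) (some 2) none
  let out := PySem.Chars.join ['0']
    ((bits.splitOn '0').map (fun run =>
      ((PySem.List.pyRepeat ['1', '1', '0'] (run.length : Int)).take run.length)))
  (PySem.Int.ofCharsBase? out 2).getD 0

-- ===== PRECONDITION & SPEC =====
-- Pre_ excludes n < 0: there bin(n) = '-0b…', so A's int(''.join(s), 2) raises ValueError on the 'b…' remnant.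
def Pre_noConseBits (n : Int) : Prop := 0 ≤ n
instance (n : Int) : Decidable (Pre_noConseBits n) := by unfold Pre_noConseBits; infer_instance
def pvWitness_noConseBits : Int := 23
def Spec_noConseBits (n : Int) (out : Int) : Prop := out = noConseBits_alt n
instance (n : Int) (out : Int) : Decidable (Spec_noConseBits n out) := by unfold Spec_noConseBits; infer_instance

-- ===== CLAIM (what is proved, stated in full; the proofs are below) =====
def Claim_equal_noConseBits : Prop := ∀ (n : Int), Dom_noConseBits n → Pre_noConseBits n → Spec_noConseBits n (noConseBits n)

-- ===== LEMMAS AND PROOFS =====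

-- reference scan: what A's loop writes, phase c = current count of consecutive ones
def gScan : Int → List Char → List Char
  | _, [] => []
  | c, ch :: t => if ch = '1' then (if c + 1 = 3 then '0' :: gScan 0 t else '1' :: gScan (c + 1) t)
                  else '0' :: gScan 0 t

-- pattern written for a single run of k ones entered at phase c
def pat : Int → Nat → List Char
  | _, 0 => []
  | c, k + 1 => if c + 1 = 3 then '0' :: pat 0 k else '1' :: pat (c + 1) k

-- joined patterns of the runs, the first entered at phase c, the rest at phase 0
def hJoin : Int → List (List Char) → List Char
  | _, [] => []
  | c, [r] => pat c r.length
  | c, r :: r2 :: rest => pat c r.length ++ '0' :: hJoin 0 (r2 :: rest)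

theorem toDigitsCore_bits (fuel : Nat) : ∀ (n : Nat) (ds : List Char),
    (∀ c ∈ ds, c = '0' ∨ c = '1') → ∀ c ∈ Nat.toDigitsCore 2 fuel n ds, c = '0' ∨ c = '1' := by
  induction fuel with
  | zero => intro n ds h; simpa [Nat.toDigitsCore] using h
  | succ fuel ih =>
    intro n ds h
    have hd : Nat.digitChar (n % 2) = '0' ∨ Nat.digitChar (n % 2) = '1' := by
      have h2 : n % 2 = 0 ∨ n % 2 = 1 := by omega
      rcases h2 with h2 | h2 <;> rw [h2] <;> simp [Nat.digitChar]
    have hcons : ∀ c ∈ Nat.digitChar (n % 2) :: ds, c = '0' ∨ c = '1' := by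
      intro c hc
      rcases List.mem_cons.mp hc with hc | hc
      · subst hc; exact hd
      · exact h c hc
    rw [Nat.toDigitsCore]
    split
    · exact hcons
    · exact ih _ _ hcons

theorem toDigits_bits (m : Nat) : ∀ c ∈ Nat.toDigits 2 m, c = '0' ∨ c = '1' :=
  toDigitsCore_bits _ _ _ (by simp)

theorem stepA_zero (c : Int) (s : List Char) (hc : 0 ≤ c) : stepA (c, s) '0' = (0, s ++ ['0']) := by
  have h0 : (if (0 : Int) < c then (0 : Int) else c) = 0 := by split <;> omega
  simp [stepA, h0]

theorem stepA_one (c : Int) (s : List Char) :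
    stepA (c, s) '1' = if c + 1 = 3 then (0, s ++ ['0']) else (c + 1, s ++ ['1']) := by
  by_cases h3 : c + 1 = 3 <;> simp [stepA, h3]

-- A's loop body, folded over the digits, writes gScan
theorem foldA_eq_gScan : ∀ (ds : List Char), (∀ c ∈ ds, c = '0' ∨ c = '1') →
    ∀ (c : Int) (s : List Char), 0 ≤ c → (ds.foldl stepA (c, s)).2 = s ++ gScan c ds := by
  intro ds
  induction ds with
  | nil => intro _ c s _; simp [gScan]
  | cons ch tl ih =>
    intro hb c s hc
    have hbtl : ∀ x ∈ tl, x = '0' ∨ x = '1' := fun x hx => hb x (List.mem_cons_of_mem _ hx)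
    rcases hb ch List.mem_cons_self with h0 | h1
    · subst h0
      rw [List.foldl_cons, stepA_zero c s hc, ih hbtl 0 (s ++ ['0']) le_rfl]
      simp [gScan]
    · subst h1
      rw [List.foldl_cons, stepA_one c s]
      by_cases h3 : c + 1 = 3
      · rw [if_pos h3, ih hbtl 0 (s ++ ['0']) le_rfl]
        simp [gScan, h3]
      · rw [if_neg h3, ih hbtl (c + 1) (s ++ ['1']) (by omega)]
        simp [gScan, h3]

theorem splitOn_zero_cons (tl : List Char) : ('0' :: tl).splitOn '0' = [] :: tl.splitOn '0' := by
  simp [List.splitOn, List.splitOnP_cons]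

theorem splitOn_one_cons (tl : List Char) :
    ('1' :: tl).splitOn '0' = (tl.splitOn '0').modifyHead (List.cons '1') := by
  simp [List.splitOn, List.splitOnP_cons]

theorem splitOn_char_ne_nil (l : List Char) : l.splitOn '0' ≠ [] :=
  List.splitOnP_ne_nil _ _

theorem hJoin_nil_cons (c : Int) (r : List Char) (rest : List (List Char)) :
    hJoin c ([] :: r :: rest) = '0' :: hJoin 0 (r :: rest) := by
  simp [hJoin, pat]

theorem hJoin_one_cons (c : Int) (r : List Char) (rest : List (List Char)) :
    hJoin c (('1' :: r) :: rest) =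
      if c + 1 = 3 then '0' :: hJoin 0 (r :: rest) else '1' :: hJoin (c + 1) (r :: rest) := by
  cases rest with
  | nil => by_cases h3 : c + 1 = 3 <;> simp [hJoin, pat, h3]
  | cons r2 rest2 => by_cases h3 : c + 1 = 3 <;> simp [hJoin, pat, h3]

theorem gScan_eq_hJoin : ∀ (ds : List Char), (∀ c ∈ ds, c = '0' ∨ c = '1') →
    ∀ (c : Int), gScan c ds = hJoin c (ds.splitOn '0') := by
  intro ds
  induction ds with
  | nil => intro _ c; simp [gScan, hJoin, pat]
  | cons ch tl ih =>
    intro hb c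
    have hbtl : ∀ x ∈ tl, x = '0' ∨ x = '1' := fun x hx => hb x (List.mem_cons_of_mem _ hx)
    obtain ⟨r, rest, hsp⟩ : ∃ r rest, tl.splitOn '0' = r :: rest := by
      cases h : tl.splitOn '0' with
      | nil => exact absurd h (splitOn_char_ne_nil tl)
      | cons a b => exact ⟨a, b, rfl⟩
    rcases hb ch List.mem_cons_self with h0 | h1
    · subst h0
      rw [splitOn_zero_cons, hsp, hJoin_nil_cons, ← hsp, ← ih hbtl 0]
      simp [gScan]
    · subst h1
      rw [splitOn_one_cons, hsp, List.modifyHead_cons, hJoin_one_cons, ← hsp,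
        ← ih hbtl 0, ← ih hbtl (c + 1)]
      simp [gScan]

theorem flatten_replicate_length (k : Nat) :
    ((List.replicate k (['1', '1', '0'] : List Char)).flatten).length = 3 * k := by
  induction k with
  | zero => simp
  | succ k ih => simp [List.replicate_succ, ih]; omega

theorem take_flatten_replicate (j a : Nat) :
    ((List.replicate (j + a) (['1', '1', '0'] : List Char)).flatten).take j =
      ((List.replicate j (['1', '1', '0'] : List Char)).flatten).take j := by
  rw [List.replicate_add, List.flatten_append, List.take_append,
    flatten_replicate_length]
  have h : j - 3 * j = 0 := by omega
  simp [h]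

theorem pat0_take : ∀ (k : Nat),
    pat 0 k = ((List.replicate k (['1', '1', '0'] : List Char)).flatten).take k := by
  intro k
  induction k using Nat.strong_induction_on with
  | _ k ih =>
    rcases k with _ | _ | _ | m
    · decide
    · decide
    · decide
    · have h1 : pat 0 (m + 3) = '1' :: '1' :: '0' :: pat 0 m := by norm_num [pat]
      have h2 : (m + 3) = (m + 2) + 1 := rfl
      rw [h1, h2, List.replicate_succ, List.flatten_cons]
      have h3 : (['1', '1', '0'] : List Char) ++ (List.replicate (m + 2) (['1', '1', '0'] : List Char)).flatten
          = '1' :: '1' :: '0' :: (List.replicate (m + 2) (['1', '1', '0'] : List Char)).flatten := by simp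
      rw [h3]
      simp only [List.take_succ_cons]
      rw [take_flatten_replicate m 2, ih m (by omega)]

theorem hJoin_eq_join : ∀ (parts : List (List Char)),
    PySem.Chars.join ['0'] (parts.map (fun r => pat 0 r.length)) = hJoin 0 parts := by
  intro parts
  induction parts with
  | nil => simp [PySem.Chars.join_nil, hJoin]
  | cons r rest ih =>
    cases rest with
    | nil => simp [PySem.Chars.join_singleton, hJoin]
    | cons r2 rest2 =>
      simp only [List.map_cons, PySem.Chars.join_cons_cons]
      simp only [List.map_cons] at ih
      rw [ih]
      simp [hJoin]

-- ===== VERDICT (by name: the statement is the Claim_ definition above) =====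
theorem noConseBits_spec : Claim_equal_noConseBits := by
  intro n _ hpre
  unfold Spec_noConseBits
  have hneg : ¬ n < 0 := not_lt.mpr hpre
  have ht : PySem.Int.toBinChars0b n = '0' :: 'b' :: Nat.toDigits 2 n.toNat := by
    simp [PySem.Int.toBinChars0b, hneg]
  simp only [noConseBits, noConseBits_alt, ht]
  rw [PySem.List.foldl_pyRange_pyGetD _ ' ' stepA ((0 : Int), ([] : List Char)) (by norm_num)]
  rw [PySem.List.slice_from _ (by norm_num)]
  have hdrop : List.drop ((2 : Int)).toNat ('0' :: 'b' :: Nat.toDigits 2 n.toNat)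
      = Nat.toDigits 2 n.toNat := rfl
  simp only [hdrop]
  have hbits : ∀ c ∈ Nat.toDigits 2 n.toNat, c = '0' ∨ c = '1' := toDigits_bits n.toNat
  have hA : ((Nat.toDigits 2 n.toNat).foldl stepA ((0 : Int), ([] : List Char))).2
      = gScan 0 (Nat.toDigits 2 n.toNat) := by
    simpa using foldA_eq_gScan _ hbits 0 [] le_rfl
  rw [hA]
  have hmap : (fun (run : List Char) =>
      (PySem.List.pyRepeat ['1', '1', '0'] (run.length : Int)).take run.length)
      = fun (run : List Char) => pat 0 run.length := by
    funext run
    rw [pat0_take]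
    simp [PySem.List.pyRepeat]
  rw [hmap, hJoin_eq_join, gScan_eq_hJoin _ hbits 0]
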